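-- pv_equiv track=rewrite | github.com/colonel-aureliano/Embedded-Mahjong-Bot | player/HandPartitioner.py | tri_extract
-- ===== SOURCE A (Python) =====
-- def tri_extract(hand):
--   remain = []
--   x = 0
--   while x < (len(hand)-2):
--       if(hand[x] == hand[x+1] == hand[x+2]):
--           x+=3
--           continue
--       remain.append(hand[x])
--       x+=1
--
--   if(x<len(hand)):
--       remain.append(hand[x])
--   if(x<len(hand)-1):
--       remain.append(hand[x+1])
--
--   return remain
-- ===== SOURCE B (Python) =====
-- def tri_extract(hand):
--     # One pass over runs of identical adjacent tiles: keep (run length % 3) copies of each.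
--     out = []
--     count = 0
--     n = len(hand)
--     for i, t in enumerate(hand):
--         count += 1
--         if i + 1 == n or hand[i + 1] != t:
--             out.extend([t] * (count % 3))
--             count = 0
--     return out
-- ===== Notes on version B (the rewrite author's own statement) =====
-- stated objective: idiomatic
-- what changed: B replaces A's index-stepping scan with a triple-lookahead test by a single run-length pass that keeps (run length % 3) copies of each maximal run of identical adjacent tiles.
import Mathlib
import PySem

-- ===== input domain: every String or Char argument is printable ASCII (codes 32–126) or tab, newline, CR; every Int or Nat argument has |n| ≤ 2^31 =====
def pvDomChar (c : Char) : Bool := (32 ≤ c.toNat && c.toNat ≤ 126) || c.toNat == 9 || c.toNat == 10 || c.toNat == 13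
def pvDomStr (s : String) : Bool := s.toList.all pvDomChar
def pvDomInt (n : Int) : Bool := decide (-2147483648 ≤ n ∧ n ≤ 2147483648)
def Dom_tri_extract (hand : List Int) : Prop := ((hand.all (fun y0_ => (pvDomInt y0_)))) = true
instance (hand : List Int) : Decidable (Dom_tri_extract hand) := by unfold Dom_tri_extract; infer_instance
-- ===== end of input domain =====

-- B re-does A's triple removal as a single run-length pass (keep run length % 3 of each run); return values proved equal on all inputs.

-- ===== PORT A =====
-- A's while loop as the obvious structural recursion: each iteration either skips a
-- triple of equal tiles (x += 3) or keeps hand[x] (x += 1); the post-loop appends of the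
-- up-to-two leftover tiles are the base case returning the remaining short list.
def tri_extract (hand : List Int) : List Int :=
  match hand with
  | a :: b :: c :: rest =>
      if a = b ∧ b = c then tri_extract rest
      else a :: tri_extract (b :: c :: rest)
  | l => l
termination_by hand.length

-- ===== PORT B =====
-- Source B's loop: count the current run; at a run boundary (next element differs or end of
-- list) emit (count % 3) copies and reset the counter.
def triAlt_go (l : List Int) (count : Nat) : List Int :=
  match l with
  | [] => []
  | [a] => List.replicate ((count + 1) % 3) a
  | a :: b :: rest =>
      if b ≠ a then List.replicate ((count + 1) % 3) a ++ triAlt_go (b :: rest) 0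
      else triAlt_go (b :: rest) (count + 1)

def tri_extract_alt (hand : List Int) : List Int := triAlt_go hand 0

-- ===== PRECONDITION & SPEC =====
def Spec_tri_extract (hand : List Int) (out : List Int) : Prop := out = tri_extract_alt hand
instance (hand : List Int) (out : List Int) : Decidable (Spec_tri_extract hand out) := by unfold Spec_tri_extract; infer_instance

-- ===== CLAIM (what is proved, stated in full; the proofs are below) =====
def Claim_equal_tri_extract : Prop := ∀ (hand : List Int), Dom_tri_extract hand → Spec_tri_extract hand (tri_extract hand)

-- ===== LEMMAS AND PROOFS =====

-- A on a run of c equal tiles followed by a list not starting with that tile.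
theorem triA_replicate (c : Nat) (a : Int) (l : List Int) (h : l.head? ≠ some a) :
    tri_extract (List.replicate c a ++ l) = List.replicate (c % 3) a ++ tri_extract l := by
  induction c using Nat.strong_induction_on with
  | _ c ih =>
    match c with
    | 0 => simp
    | 1 =>
      match l with
      | [] => simp [tri_extract]
      | [b] => simp [tri_extract]
      | b :: d :: t =>
        have hb : a ≠ b := by simpa using fun e => h (by simp [e])
        simp [tri_extract, hb]
    | 2 =>
      match l with
      | [] => simp [tri_extract]
      | b :: t =>
        have hb : a ≠ b := by simpa using fun e => h (by simp [e])
        have h1 := ih 1 (by omega)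
        simp only [List.replicate, List.cons_append, List.nil_append] at h1 ⊢
        simp [tri_extract, hb, h1]
    | (n + 3) =>
      have h3 := ih n (by omega)
      simp only [List.replicate, List.cons_append] at h3 ⊢
      simp [tri_extract, h3, Nat.add_mod_right]

-- B consumes a run of k+1 equal tiles on top of count already-seen copies.
theorem triAlt_replicate (k : Nat) (a : Int) (l : List Int) (c : Nat) (h : l.head? ≠ some a) :
    triAlt_go (List.replicate (k + 1) a ++ l) c
      = List.replicate ((c + k + 1) % 3) a ++ triAlt_go l 0 := by
  induction k generalizing c with
  | zero =>
    match l with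
    | [] => simp [triAlt_go]
    | b :: t =>
      have hb : b ≠ a := by simpa using fun e => h (by simp [e])
      simp [triAlt_go, hb]
  | succ k ih =>
    have := ih (c + 1)
    simp only [List.replicate, List.cons_append] at this ⊢
    simp only [triAlt_go]
    rw [if_neg (by simp)]
    rw [this]
    ring_nf

theorem head?_dropWhile_ne (a : Int) (l : List Int) :
    (l.dropWhile (· == a)).head? ≠ some a := by
  induction l with
  | nil => simp
  | cons b t ih =>
    by_cases hb : b = a
    · simpa [List.dropWhile_cons, hb] using ih
    · simp [hb]

theorem takeWhile_eq_replicate (a : Int) (l : List Int) :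
    l.takeWhile (· == a) = List.replicate (l.takeWhile (· == a)).length a := by
  rw [List.eq_replicate_iff]
  refine ⟨rfl, fun b hb => ?_⟩
  have := List.mem_takeWhile_imp hb
  simpa using this

theorem main_aux : ∀ (n : Nat) (l : List Int), l.length ≤ n → tri_extract l = triAlt_go l 0 := by
  intro n
  induction n with
  | zero =>
    intro l hl
    have : l = [] := List.eq_nil_of_length_eq_zero (by omega)
    simp [this, tri_extract, triAlt_go]
  | succ n ih =>
    intro l hl
    match l with
    | [] => simp [tri_extract, triAlt_go]
    | a :: rest =>
      have hsplit : rest = rest.takeWhile (· == a) ++ rest.dropWhile (· == a) :=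
        (List.takeWhile_append_dropWhile).symm
      set k := (rest.takeWhile (· == a)).length with hk
      set l' := rest.dropWhile (· == a) with hl'
      have hrep : rest.takeWhile (· == a) = List.replicate k a := takeWhile_eq_replicate a rest
      have hhead : l'.head? ≠ some a := head?_dropWhile_ne a rest
      have hlist : a :: rest = List.replicate (k + 1) a ++ l' := by
        rw [hsplit, hrep]
        simp [List.replicate_succ]
      have hlen : l'.length ≤ n := by
        have := List.length_dropWhile_le (p := (· == a)) (l := rest)
        have : l'.length ≤ rest.length := this
        simp at hl
        omega
      rw [hlist, triA_replicate (k + 1) a l' hhead, triAlt_replicate k a l' 0 hhead,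
        ih l' hlen]
      norm_num

-- ===== VERDICT (by name: the statement is the Claim_ definition above) =====
theorem tri_extract_spec : Claim_equal_tri_extract := by
  intro hand _
  unfold Spec_tri_extract tri_extract_alt
  exact main_aux hand.length hand le_rfl
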